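-- pv_equiv track=rewrite | github.com/OkhotnikovFN/Yandex-Algorithms | trainings_1.0/hw_5/task_g/g.py | get_count_possible_variations
-- ===== SOURCE A (Python) =====
-- from typing import Iterator
--
-- def get_count_possible_variations(max_diff: int, cards: Iterator) -> int:
--     """
--     Функция которая определяет количество различных вариантов счета, которые можно показать на табло.
--         Параметры:
--             :param max_diff: коэффициент максимального различия баллов
--             :type max_diff: int
--             :param cards: итератор значений чисел на карточках
--             :type cards: Iterator
--         Возвращаемое значение:
--             :return: количество возможных вариантов
--             :rtype: int
--     """
--     cards_dict = {}
--     uniq_cards = []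
--     for card in cards:
--         if card in cards_dict:
--             cards_dict[card] += 1
--         else:
--             uniq_cards.append(card)
--             cards_dict[card] = 1
--     uniq_cards.sort()
--
--     right = 0
--     ans = 0
--     duplicates = 0
--     for left in range(len(uniq_cards)):
--         while right < len(uniq_cards) and uniq_cards[left] * max_diff >= uniq_cards[right]:
--             if cards_dict[uniq_cards[right]] >= 2:
--                 duplicates += 1
--             right += 1
--         range_len = right - left
--         if cards_dict[uniq_cards[left]] >= 2:
--             ans += (range_len - 1) * 3
--             duplicates -= 1
--         if cards_dict[uniq_cards[left]] >= 3:
--             ans += 1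
--         ans += (range_len - 1) * (range_len - 2) * 3
--         ans += duplicates * 3
--
--     return ans
-- ===== SOURCE B (Python) =====
-- def get_count_possible_variations(max_diff, cards):
--     counts = {}
--     for card in cards:
--         counts[card] = counts.get(card, 0) + 1
--     uniq = sorted(counts)
--     n = len(uniq)
--     pref = [0]
--     for v in uniq:
--         pref.append(pref[-1] + (1 if counts[v] >= 2 else 0))
--     ans = 0
--     right = 0
--     for left in range(n):
--         threshold = uniq[left] * max_diff
--         lo, hi = 0, n
--         while lo < hi:
--             mid = (lo + hi) // 2
--             if uniq[mid] <= threshold: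
--                 lo = mid + 1
--             else:
--                 hi = mid
--         if lo > right:
--             right = lo
--         rl = right - left
--         ans += (rl - 1) * (rl - 2) * 3
--         ans += (pref[right] - pref[left + 1]) * 3
--         if counts[uniq[left]] >= 2:
--             ans += (rl - 1) * 3
--         if counts[uniq[left]] >= 3:
--             ans += 1
--     return ans
-- ===== Notes on version B (the rewrite author's own statement) =====
-- stated objective: alternative
-- what changed: A's inner two-pointer while loop that advances `right` while counting duplicates on the way is replaced by a per-left hand-written binary search for the window end (kept monotone with a running max) plus a precomputed prefix array of duplicate counts, so the inner scan and the running duplicates counter disappear.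
import Mathlib
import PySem

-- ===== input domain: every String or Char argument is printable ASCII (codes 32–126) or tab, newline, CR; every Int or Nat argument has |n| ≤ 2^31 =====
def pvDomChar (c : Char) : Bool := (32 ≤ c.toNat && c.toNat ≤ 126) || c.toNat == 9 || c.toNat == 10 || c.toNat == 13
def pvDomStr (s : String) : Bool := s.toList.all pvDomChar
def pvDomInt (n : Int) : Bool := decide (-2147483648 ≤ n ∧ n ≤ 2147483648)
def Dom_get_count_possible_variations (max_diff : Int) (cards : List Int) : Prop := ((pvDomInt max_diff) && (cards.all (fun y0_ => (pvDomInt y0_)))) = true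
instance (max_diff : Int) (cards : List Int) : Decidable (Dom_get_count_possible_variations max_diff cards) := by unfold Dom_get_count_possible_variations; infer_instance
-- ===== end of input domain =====

-- B replaces A's inner duplicate-counting while loop by a binary search for the window end
-- plus a precomputed prefix array of duplicate counts (objective: alternative).

-- ===== PORT A =====
-- A's dict/uniq-list building loop
def pvABuild (st : PySem.Dict Int Int × List Int) (card : Int) : PySem.Dict Int Int × List Int :=
  if st.1.contains card then (st.1.insert card (st.1.getD card 0 + 1), st.2)
  else (st.1.insert card 1, st.2 ++ [card])

-- A's inner while loop: advance `right`, counting duplicates on the way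
def pvAWhile (md : Int) (u : List Int) (d : PySem.Dict Int Int) (lv : Int) (right : Nat) (dup : Int) : Nat × Int :=
  if h : right < u.length ∧ u.getD right 0 ≤ lv * md then
    pvAWhile md u d lv (right + 1) (if 2 ≤ d.getD (u.getD right 0) 0 then dup + 1 else dup)
  else (right, dup)
termination_by u.length - right
decreasing_by omega

-- A's body of `for left in range(len(uniq_cards))`, state = (right, ans, duplicates)
def pvAStep (md : Int) (u : List Int) (d : PySem.Dict Int Int) (st : Nat × Int × Int) (left : Nat) : Nat × Int × Int :=
  let rd := pvAWhile md u d (u.getD left 0) st.1 st.2.2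
  let range_len : Int := (rd.1 : Int) - (left : Int)
  let ans := st.2.1
  let ans := if 2 ≤ d.getD (u.getD left 0) 0 then ans + (range_len - 1) * 3 else ans
  let dup := if 2 ≤ d.getD (u.getD left 0) 0 then rd.2 - 1 else rd.2
  let ans := if 3 ≤ d.getD (u.getD left 0) 0 then ans + 1 else ans
  let ans := ans + (range_len - 1) * (range_len - 2) * 3
  let ans := ans + dup * 3
  (rd.1, ans, dup)

def get_count_possible_variations (max_diff : Int) (cards : List Int) : Int :=
  let du := cards.foldl pvABuild ((PySem.Dict.empty : PySem.Dict Int Int), ([] : List Int))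
  let uniq := PySem.List.sorted du.2 (fun x => x) false
  ((List.range uniq.length).foldl (pvAStep max_diff uniq du.1) (0, 0, 0)).2.1

-- ===== PORT B =====
-- B's hand-written bisect_right (Source B cannot import bisect): binary search on [lo, hi)
def pvBisect (u : List Int) (thr : Int) (lo hi : Nat) : Nat :=
  if h : lo < hi then
    let mid := (lo + hi) / 2
    if u.getD mid 0 ≤ thr then pvBisect u thr (mid + 1) hi else pvBisect u thr lo mid
  else lo
termination_by hi - lo
decreasing_by all_goals omega

-- B's body of `for left in range(n)`, state = (right, ans)
def pvBStep (md : Int) (u : List Int) (d : PySem.Dict Int Int) (pref : List Int) (st : Nat × Int) (left : Nat) : Nat × Int :=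
  let threshold := u.getD left 0 * md
  let lo := pvBisect u threshold 0 u.length
  let right := if st.1 < lo then lo else st.1
  let rl : Int := (right : Int) - (left : Int)
  let ans := st.2 + (rl - 1) * (rl - 2) * 3
  let ans := ans + (pref.getD right 0 - pref.getD (left + 1) 0) * 3
  let ans := if 2 ≤ d.getD (u.getD left 0) 0 then ans + (rl - 1) * 3 else ans
  let ans := if 3 ≤ d.getD (u.getD left 0) 0 then ans + 1 else ans
  (right, ans)

def get_count_possible_variations_alt (max_diff : Int) (cards : List Int) : Int :=
  let counts := cards.foldl (fun (d : PySem.Dict Int Int) card => d.insert card (d.getD card 0 + 1)) PySem.Dict.empty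
  let uniq := PySem.List.sorted counts.keys (fun x => x) false
  let pref := uniq.foldl
    (fun (p : List Int) v => p ++ [PySem.List.pyGetD p (-1) 0 + (if 2 ≤ counts.getD v 0 then 1 else 0)])
    [(0 : Int)]
  ((List.range uniq.length).foldl (pvBStep max_diff uniq counts pref) (0, 0)).2

-- ===== PRECONDITION & SPEC =====
def Spec_get_count_possible_variations (max_diff : Int) (cards : List Int) (out : Int) : Prop := out = get_count_possible_variations_alt max_diff cards
instance (max_diff : Int) (cards : List Int) (out : Int) : Decidable (Spec_get_count_possible_variations max_diff cards out) := by unfold Spec_get_count_possible_variations; infer_instance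

-- ===== CLAIM (what is proved, stated in full; the proofs are below) =====
def Claim_equal_get_count_possible_variations : Prop := ∀ (max_diff : Int) (cards : List Int), Dom_get_count_possible_variations max_diff cards → Spec_get_count_possible_variations max_diff cards (get_count_possible_variations max_diff cards)

-- ===== LEMMAS AND PROOFS =====

-- prefix duplicate count: number of values with multiplicity ≥ 2 among the first i uniques
def pvP (u : List Int) (d : PySem.Dict Int Int) (i : Nat) : Int :=
  ((u.take i).countP (fun v => decide ((2 : Int) ≤ d.getD v 0)) : Nat)

lemma pvP_succ (u : List Int) (d : PySem.Dict Int Int) (i : Nat) (h : i < u.length) :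
    pvP u d (i + 1) = pvP u d i + (if (2 : Int) ≤ d.getD u[i] 0 then 1 else 0) := by
  unfold pvP
  rw [List.take_add_one, List.getElem?_eq_getElem h, List.countP_append]
  simp only [Option.toList_some, List.countP_cons, List.countP_nil]
  push_cast
  split_ifs with hc hc2 <;> simp_all

lemma pvBisect_inv (u : List Int) (thr : Int)
    (hs : ∀ p q (hpq : p ≤ q) (hq : q < u.length), u[p]'(by omega) ≤ u[q]) :
    ∀ lo hi, lo ≤ hi → hi ≤ u.length →
    (∀ i (h : i < u.length), i < lo → u[i] ≤ thr) →
    (∀ i (h : i < u.length), hi ≤ i → thr < u[i]) →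
    lo ≤ pvBisect u thr lo hi ∧ pvBisect u thr lo hi ≤ hi ∧
    (∀ i (h : i < u.length), i < pvBisect u thr lo hi → u[i] ≤ thr) ∧
    (∀ i (h : i < u.length), pvBisect u thr lo hi ≤ i → thr < u[i]) := by
  intro lo hi
  fun_induction pvBisect u thr lo hi with
  | case1 lo hi h mid hle ih =>
    intro hlh hhn H1 H2
    have hmid : mid < u.length := by omega
    obtain ⟨a, b, c, d⟩ := ih (by omega) hhn
      (by intro i hi' hilt
          by_cases hc : i < lo
          · exact H1 i hi' hc
          · calc u[i] ≤ u[mid] := hs i mid (by omega) hmid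
              _ ≤ thr := by simpa [List.getD_eq_getElem?_getD, List.getElem?_eq_getElem hmid] using hle)
      H2
    exact ⟨by omega, by omega, c, d⟩
  | case2 lo hi h mid hgt ih =>
    intro hlh hhn H1 H2
    have hmid : mid < u.length := by omega
    obtain ⟨a, b, c, d⟩ := ih (by omega) (by omega) H1
      (by intro i hi' hge
          calc thr < u[mid] := by
                simpa [List.getD_eq_getElem?_getD, List.getElem?_eq_getElem hmid] using hgt
            _ ≤ u[i] := hs mid i hge hi')
    exact ⟨a, by omega, c, d⟩
  | case3 lo hi h =>
    intro hlh hhn H1 H2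
    exact ⟨le_refl _, by omega, fun i h' hi' => H1 i h' hi', fun i h' hi' => H2 i h' (by omega)⟩

lemma pvAWhile_spec (md : Int) (u : List Int) (d : PySem.Dict Int Int) (lv : Int)
    (b : Nat) (hb : b ≤ u.length)
    (hiff : ∀ i (h : i < u.length), u[i] ≤ lv * md ↔ i < b) :
    ∀ right dup, pvAWhile md u d lv right dup
      = (max right b, dup + (pvP u d (max right b) - pvP u d right)) := by
  intro right dup
  fun_induction pvAWhile md u d lv right dup with
  | case1 r dup h ih =>
    obtain ⟨hr, hle⟩ := h
    have hget : u.getD r 0 = u[r] := List.getD_eq_getElem u 0 hr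
    have hrb : r < b := (hiff r hr).1 (by rwa [hget] at hle)
    have hmax : max (r + 1) b = max r b := by omega
    simp only [dite_eq_ite] at ih
    rw [ih, hmax, hget, pvP_succ u d r hr]
    split_ifs with hc <;> ring_nf
  | case2 r dup h =>
    have hrb : b ≤ r := by
      by_contra hc
      have hr : r < u.length := by omega
      exact h ⟨hr, by rw [List.getD_eq_getElem u 0 hr]; exact (hiff r hr).2 (by omega)⟩
    have : max r b = r := by omega
    simp [this]

lemma pvPrefFold (d : PySem.Dict Int Int) :
    ∀ (l acc : List Int) (h : acc ≠ []),
    l.foldl (fun (p : List Int) v => p ++ [PySem.List.pyGetD p (-1) 0 + (if 2 ≤ d.getD v 0 then 1 else 0)]) acc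
      = acc ++ (List.range l.length).map (fun i => acc.getLast h + pvP l d (i + 1)) := by
  intro l
  induction l with
  | nil => intro acc h; simp
  | cons v t ih =>
    intro acc h
    simp only [List.foldl_cons]
    rw [PySem.List.pyGetD_neg_one acc 0 h]
    have hne : acc ++ [acc.getLast h + (if 2 ≤ d.getD v 0 then 1 else 0)] ≠ [] := by simp
    rw [ih _ hne]
    have hlast : (acc ++ [acc.getLast h + (if 2 ≤ d.getD v 0 then 1 else 0)]).getLast hne
        = acc.getLast h + (if 2 ≤ d.getD v 0 then 1 else 0) := by simp
    rw [hlast]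
    rw [List.length_cons, List.range_succ_eq_map]
    simp only [List.map_cons, List.map_map, List.append_assoc, List.singleton_append]
    congr 1
    · congr 1
      · unfold pvP
        simp only [List.take_succ_cons, List.take_zero, List.countP_cons, List.countP_nil]
        split_ifs <;> simp_all <;> omega
      · apply List.map_congr_left
        intro i _
        have : pvP (v :: t) d (i + 1 + 1) = (if (2:Int) ≤ d.getD v 0 then 1 else 0) + pvP t d (i + 1) := by
          unfold pvP
          simp only [List.take_succ_cons, List.countP_cons]
          push_cast
          split_ifs <;> simp_all <;> omega
        simp only [Function.comp_apply, this]
        ring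

lemma pvABuild_spec : ∀ (cards : List Int) (d : PySem.Dict Int Int),
    cards.foldl pvABuild (d, d.keys)
      = (cards.foldl (fun d card => d.insert card (d.getD card 0 + 1)) d,
         (cards.foldl (fun d card => d.insert card (d.getD card 0 + 1)) d).keys) := by
  intro cards
  induction cards with
  | nil => simp
  | cons c cs ih =>
    intro d
    simp only [List.foldl_cons]
    by_cases hc : d.contains c
    · have h1 : pvABuild (d, d.keys) c = (d.insert c (d.getD c 0 + 1), d.keys) := by
        simp [pvABuild, hc]
      rw [h1, PySem.Dict.keys_insert_of_contains d _ hc |>.symm]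
      exact ih _
    · have hc' : d.contains c = false := by simpa using hc
      have h1 : pvABuild (d, d.keys) c = (d.insert c (d.getD c 0 + 1), d.keys ++ [c]) := by
        simp [pvABuild, hc', PySem.Dict.getD_of_not_contains d 0 hc']
      rw [h1, (PySem.Dict.keys_insert_of_not_contains d _ hc').symm]
      exact ih _

-- the two loops agree: B's (right, ans) matches A's, and A's duplicates counter is the prefix difference
lemma pvLoop (md : Int) (u : List Int) (d : PySem.Dict Int Int) (pref : List Int)
    (hs : ∀ p q (hpq : p ≤ q) (hq : q < u.length), u[p]'(by omega) ≤ u[q])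
    (hpref : ∀ r, r ≤ u.length → pref.getD r 0 = pvP u d r) :
    ∀ k, k ≤ u.length →
    ((List.range k).foldl (pvBStep md u d pref) (0, 0)).1 ≤ u.length ∧
    (List.range k).foldl (pvAStep md u d) (0, 0, 0)
      = (((List.range k).foldl (pvBStep md u d pref) (0, 0)).1,
         ((List.range k).foldl (pvBStep md u d pref) (0, 0)).2,
         pvP u d ((List.range k).foldl (pvBStep md u d pref) (0, 0)).1 - pvP u d k) := by
  intro k
  induction k with
  | zero => intro _; simp [pvP]
  | succ k ih =>
    intro hk1
    obtain ⟨hSn, hA⟩ := ih (by omega)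
    have hkn : k < u.length := by omega
    set S := (List.range k).foldl (pvBStep md u d pref) (0, 0) with hS
    -- the bisect boundary b for threshold u[k] * md
    obtain ⟨hb0, hbn, hb1, hb2⟩ := pvBisect_inv u (u.getD k 0 * md) hs 0 u.length
      (by omega) (le_refl _) (by omega) (by intro i h hi; omega)
    set b := pvBisect u (u.getD k 0 * md) 0 u.length with hbdef
    have hiff : ∀ i (h : i < u.length), u[i] ≤ u.getD k 0 * md ↔ i < b := by
      intro i h
      constructor
      · intro hle
        by_contra hc
        exact absurd hle (not_le.mpr (hb2 i h (by omega)))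
      · exact hb1 i h
    have hmaxn : max S.1 b ≤ u.length := by omega
    have hW := pvAWhile_spec md u d (u.getD k 0) b hbn hiff S.1 (pvP u d S.1 - pvP u d k)
    have hmax : (if S.1 < b then b else S.1) = max S.1 b := by split_ifs <;> omega
    rw [List.range_succ, List.foldl_append, List.foldl_append, List.foldl_cons, List.foldl_nil,
        List.foldl_cons, List.foldl_nil, hA]
    simp only [pvAStep, pvBStep, ← hS, ← hbdef, hmax, hW]
    have hgetk : u.getD k 0 = u[k] := List.getD_eq_getElem u 0 hkn
    have hPsucc := pvP_succ u d k hkn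
    rw [hpref _ hmaxn, hpref _ (by omega : k + 1 ≤ u.length)]
    constructor
    · simpa using hmaxn
    · rw [hgetk, hPsucc]
      split_ifs <;> simp only [Prod.mk.injEq] <;> exact ⟨trivial, by ring, by ring⟩
-- ===== VERDICT (by name: the statement is the Claim_ definition above) =====
theorem get_count_possible_variations_spec : Claim_equal_get_count_possible_variations := by
  unfold Claim_equal_get_count_possible_variations Spec_get_count_possible_variations
  intro md cards _
  unfold get_count_possible_variations get_count_possible_variations_alt
  have hkeys : ((PySem.Dict.empty : PySem.Dict Int Int), ([] : List Int))
      = ((PySem.Dict.empty : PySem.Dict Int Int), (PySem.Dict.empty : PySem.Dict Int Int).keys) := rfl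
  rw [hkeys, pvABuild_spec cards PySem.Dict.empty]
  set D := cards.foldl (fun (d : PySem.Dict Int Int) card => d.insert card (d.getD card 0 + 1)) PySem.Dict.empty with hD
  set U := PySem.List.sorted D.keys (fun x => x) false with hU
  have hs : ∀ p q (hpq : p ≤ q) (hq : q < U.length), U[p]'(by omega) ≤ U[q] := by
    intro p q hpq hq
    exact PySem.List.key_sorted_getElem_mono D.keys (fun x => x) hpq hq
  have hprefL := pvPrefFold D U [(0 : Int)] (by simp)
  have hpref : ∀ r, r ≤ U.length →
      (U.foldl (fun (p : List Int) v => p ++ [PySem.List.pyGetD p (-1) 0 + (if 2 ≤ D.getD v 0 then 1 else 0)]) [(0 : Int)]).getD r 0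
        = pvP U D r := by
    intro r hr
    rw [hprefL]
    match r with
    | 0 => simp [pvP]
    | (j + 1) =>
      have hj : j < U.length := by omega
      rw [List.singleton_append, List.getD_cons_succ]
      rw [PySem.List.getD_map_range _ U.length j 0 hj]
      simp
  obtain ⟨_, hA⟩ := pvLoop md U D _ hs hpref U.length (le_refl _)
  dsimp only
  rw [hA]
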